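-- pv_equiv track=rewrite | github.com/VishalRaut2106/daily-progress | Difficulty: Medium/All Unique Permutations of an array/all-unique-permutations-of-an-array.py | uniquePerms
-- ===== SOURCE A (Python) =====
-- def uniquePerms(arr):
--     res = []
--     arr.sort()
--     used = [False] * len(arr)
--
--     def backtrack(path):
--         if len(path) == len(arr):
--             res.append(path[:])
--             return
--
--         for i in range(len(arr)):
--             if used[i]:
--                 continue
--             # Skip duplicates
--             if i > 0 and arr[i] == arr[i-1] and not used[i-1]:
--                 continue
--
--             used[i] = True
--             path.append(arr[i])
--             backtrack(path)
--             path.pop()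
--             used[i] = False
--
--     backtrack([])
--     return res
-- ===== SOURCE B (Python) =====
-- def uniquePerms(arr):
--     arr.sort()  # keep A's in-place sort side effect
--
--     def perms(ms):
--         # all permutations of the multiset ms, lexicographically
--         if not ms:
--             return [[]]
--         res = []
--         for v in sorted(set(ms)):
--             rest = ms.copy()
--             rest.remove(v)
--             res += [[v] + p for p in perms(rest)]
--         return res
--
--     return perms(arr)
-- ===== Notes on version B (the rewrite author's own statement) =====
-- stated objective: simpler
-- what changed: replaced the index-based backtracker with a used[] mask and duplicate-skip test by a direct multiset recursion: pick each distinct value of the remaining multiset in sorted order, remove one occurrence and recurse, which emits the same lexicographic list of unique permutations with no index bookkeeping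
import Mathlib
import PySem

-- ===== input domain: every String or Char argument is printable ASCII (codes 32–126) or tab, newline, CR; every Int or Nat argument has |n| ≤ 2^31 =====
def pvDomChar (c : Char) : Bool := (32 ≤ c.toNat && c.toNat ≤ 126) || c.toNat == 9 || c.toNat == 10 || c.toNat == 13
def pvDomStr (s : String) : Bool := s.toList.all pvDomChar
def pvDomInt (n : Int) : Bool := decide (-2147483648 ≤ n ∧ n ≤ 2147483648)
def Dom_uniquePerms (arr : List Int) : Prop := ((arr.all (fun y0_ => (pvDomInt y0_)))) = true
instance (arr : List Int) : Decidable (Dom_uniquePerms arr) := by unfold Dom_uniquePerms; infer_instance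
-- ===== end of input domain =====

-- B is a direct multiset recursion (pick each distinct remaining value in sorted order,
-- remove one occurrence, recurse) instead of A's index backtracker with a used[] mask and
-- duplicate-skip test; same return value, no speed claim. Both Pythons sort arr in place;
-- B performs the same mutation, and the equivalence proved here is about the RETURN value.

-- ===== PORT A =====
-- The recursion depth of `backtrack` is at most len(arr)+1; `fuel` is the totality device.
-- `used`/`path` are restored by every loop iteration, so they are threaded functionally:
-- the recursive call receives `used.set i true` and `path ++ [arr[i]]`, the fold state is
-- the permutations this call appends to `res`.
def bt (arr : List Int) (fuel : Nat) (used : List Bool) (path : List Int) : List (List Int) :=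
  if path.length = arr.length then [path]
  else
    match fuel with
    | 0 => []
    | fuel' + 1 =>
      (List.range arr.length).foldl (fun res i =>
        if used.getD i false then res
        else if 0 < i ∧ arr.getD i 0 = arr.getD (i - 1) 0 ∧ used.getD (i - 1) false = false then res
        else res ++ bt arr fuel' (used.set i true) (path ++ [arr.getD i 0])) []

def uniquePerms (arr : List Int) : List (List Int) :=
  bt (PySem.List.sorted arr (fun v => v) false) (arr.length + 1)
    (List.replicate arr.length false) []

-- ===== PORT B =====
-- The recursion depth of `perms` is at most len(ms)+1; `fuel` is the totality device.
def permsB (fuel : Nat) (ms : List Int) : List (List Int) :=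
  match fuel with
  | 0 => []
  | fuel' + 1 =>
    if ms.isEmpty then [[]]
    else
      (PySem.List.sorted (PySem.Set.ofList ms) (fun v => v) false).foldl (fun res v =>
        match PySem.List.remove? ms v with   -- rest = ms.copy(); rest.remove(v) — none is unreachable: v ∈ ms
        | some rest => res ++ (permsB fuel' rest).map (fun p => v :: p)
        | none => res) []

def uniquePerms_alt (arr : List Int) : List (List Int) :=
  permsB (arr.length + 1) (PySem.List.sorted arr (fun v => v) false)

-- ===== PRECONDITION & SPEC =====
def Spec_uniquePerms (arr : List Int) (out : List (List Int)) : Prop := out = uniquePerms_alt arr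
instance (arr : List Int) (out : List (List Int)) : Decidable (Spec_uniquePerms arr out) := by
  unfold Spec_uniquePerms; infer_instance

-- ===== CLAIM (what is proved, stated in full; the proofs are below) =====
def Claim_equal_uniquePerms : Prop := ∀ (arr : List Int), Dom_uniquePerms arr → Spec_uniquePerms arr (uniquePerms arr)

-- ===== LEMMAS AND PROOFS =====

-- the multiset of still-unused values, in index order
def remu (arr : List Int) (used : List Bool) : List Int :=
  (List.range arr.length).filterMap
    (fun j => if used.getD j false then none else some (arr.getD j 0))

-- the indices A's inner loop actually descends into
def okB (arr : List Int) (used : List Bool) (i : Nat) : Bool :=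
  !used.getD i false &&
    (decide (i = 0) || decide (arr.getD i 0 ≠ arr.getD (i - 1) 0) || used.getD (i - 1) false)

-- loop invariant: used has arr's length, arr is sorted, and inside each block of equal
-- values the used indices form a prefix
def InvA (arr : List Int) (used : List Bool) : Prop :=
  used.length = arr.length ∧ List.Pairwise (· ≤ ·) arr ∧
    ∀ j, 0 < j → j < arr.length → arr.getD j 0 = arr.getD (j - 1) 0 →
      used.getD j false = true → used.getD (j - 1) false = true

theorem getD_set' (xs : List Bool) (i j : Nat) (v d : Bool) :
    (xs.set i v).getD j d = if i = j ∧ i < xs.length then v else xs.getD j d := by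
  simp only [List.getD, List.getElem?_set]
  split_ifs with h1 h2 h3 h4 <;> simp_all <;> omega

theorem getD_mono (arr : List Int) (h : List.Pairwise (· ≤ ·) arr) (p q : Nat)
    (hpq : p ≤ q) (hq : q < arr.length) : arr.getD p 0 ≤ arr.getD q 0 := by
  rcases Nat.lt_or_ge p q with hlt | hge
  · rw [List.getD_eq_getElem arr 0 (by omega), List.getD_eq_getElem arr 0 hq]
    exact List.pairwise_iff_getElem.1 h p q (by omega) hq hlt
  · simp [show p = q by omega]

theorem okB_unused (arr : List Int) (used : List Bool) (i : Nat) (h : okB arr used i = true) :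
    used.getD i false = false := by
  simp only [okB, Bool.and_eq_true, Bool.not_eq_true'] at h
  exact h.1

-- inside a block of equal values, `used` propagates downward
theorem cascade (arr : List Int) (used : List Bool) (hI : InvA arr used) :
    ∀ j k, k ≤ j → j < arr.length → arr.getD k 0 = arr.getD j 0 →
      used.getD j false = true → used.getD k false = true := by
  obtain ⟨hlen, hpair, hP⟩ := hI
  intro j
  induction j with
  | zero =>
    intro k hk _ _ hu
    simpa [show k = 0 by omega] using hu
  | succ j ih =>
    intro k hk hj heq hu
    rcases Nat.eq_or_lt_of_le hk with rfl | hk'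
    · exact hu
    · have heq2 : arr.getD j 0 = arr.getD (j + 1) 0 := by
        have h1 : arr.getD k 0 ≤ arr.getD j 0 := getD_mono arr hpair k j (by omega) (by omega)
        have h2 : arr.getD j 0 ≤ arr.getD (j + 1) 0 := getD_mono arr hpair j (j + 1) (by omega) hj
        omega
      have hu_j : used.getD j false = true :=
        hP (j + 1) (by omega) hj (by simpa using heq2.symm) hu
      exact ih k (by omega) (by omega) (heq.trans heq2.symm) hu_j

-- an index the loop descends into is the FIRST unused index carrying its value
theorem first_occ (arr : List Int) (used : List Bool) (hI : InvA arr used) (j : Nat)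
    (hj : j < arr.length) (hok : okB arr used j = true) :
    ∀ k, k < j → used.getD k false = false → arr.getD k 0 ≠ arr.getD j 0 := by
  intro k hk hu heq
  have hj0 : 0 < j := by omega
  simp only [okB, Bool.and_eq_true, Bool.or_eq_true, Bool.not_eq_true', decide_eq_true_eq] at hok
  obtain ⟨hju, hd⟩ := hok
  have hd' : j = 0 ∨ (arr.getD j 0 ≠ arr.getD (j - 1) 0) ∨ used.getD (j - 1) false = true := by
    tauto
  have hmono1 : arr.getD k 0 ≤ arr.getD (j - 1) 0 := getD_mono arr hI.2.1 k (j - 1) (by omega) (by omega)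
  have hmono2 : arr.getD (j - 1) 0 ≤ arr.getD j 0 := getD_mono arr hI.2.1 (j - 1) j (by omega) hj
  have heqj1 : arr.getD (j - 1) 0 = arr.getD j 0 := by omega
  have hu1 : used.getD (j - 1) false = true := by
    rcases hd' with h0 | hne | hu1
    · omega
    · exact absurd heqj1.symm hne
    · exact hu1
  have := cascade arr used ⟨hI.1, hI.2.1, hI.2.2⟩ (j - 1) k (by omega) (by omega) (by omega) hu1
  rw [this] at hu; exact absurd hu (by decide)

theorem mem_remu (arr : List Int) (used : List Bool) (v : Int) :
    v ∈ remu arr used ↔ ∃ k, k < arr.length ∧ used.getD k false = false ∧ arr.getD k 0 = v := by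
  simp only [remu, List.mem_filterMap, List.mem_range]
  constructor
  · rintro ⟨k, hk, hf⟩
    cases hu : used.getD k false with
    | true => rw [if_pos hu] at hf; simp at hf
    | false =>
      rw [if_neg (by simp only [hu]; simp)] at hf
      exact ⟨k, hk, hu, Option.some.inj hf⟩
  · rintro ⟨k, hk, hu, hv⟩
    exact ⟨k, hk, by rw [if_neg (by simp only [hu]; simp), hv]⟩

theorem range_split (n j : Nat) (hj : j < n) :
    List.range n = List.range' 0 j ++ j :: List.range' (j + 1) (n - j - 1) := by
  have h2 : List.range' j (n - j) = j :: List.range' (j + 1) (n - j - 1) := by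
    conv_lhs => rw [show n - j = (n - j - 1) + 1 by omega, List.range'_succ]
  have h1 : List.range' 0 j ++ List.range' j (n - j) = List.range' 0 n := by
    have := List.range'_append (s := 0) (m := j) (n := n - j) (step := 1)
    simp only [Nat.one_mul, Nat.zero_add] at this
    rw [this, show j + (n - j) = n by omega]
  rw [List.range_eq_range', ← h1, h2]

-- descending into index j removes the first occurrence of arr[j] from the unused multiset
theorem remu_set (arr : List Int) (used : List Bool) (j : Nat)
    (hj : j < arr.length) (hlen : used.length = arr.length)
    (hju : used.getD j false = false)
    (hne : ∀ k, k < j → used.getD k false = false → arr.getD k 0 ≠ arr.getD j 0) :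
    remu arr (used.set j true) = (remu arr used).erase (arr.getD j 0) := by
  have hcongr : ∀ (l : List Nat), (∀ k ∈ l, k ≠ j) →
      l.filterMap (fun k => if (used.set j true).getD k false then none else some (arr.getD k 0))
        = l.filterMap (fun k => if used.getD k false then none else some (arr.getD k 0)) := by
    intro l hl
    apply List.filterMap_congr
    intro k hk
    have hnot : ¬ (j = k ∧ j < used.length) := fun h => hl k hk h.1.symm
    rw [getD_set' used j k true false, if_neg hnot]
  have hnotmemA : (arr.getD j 0) ∉
      (List.range' 0 j).filterMap (fun k => if used.getD k false then none else some (arr.getD k 0)) := by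
    intro hmem
    simp only [List.mem_filterMap] at hmem
    obtain ⟨k, hkmem, hf⟩ := hmem
    have hkj : k < j := by
      have := List.mem_range'_1.1 hkmem; omega
    cases hu : used.getD k false with
    | true => rw [if_pos hu] at hf; simp at hf
    | false =>
      rw [if_neg (by simp only [hu]; simp)] at hf
      exact hne k hkj hu (Option.some.inj hf)
  have hsetj : (used.set j true).getD j false = true := by
    rw [getD_set' used j j true false, if_pos ⟨rfl, by omega⟩]
  unfold remu
  rw [range_split arr.length j hj, List.filterMap_append, List.filterMap_append,
      List.filterMap_cons_none (by rw [hsetj]; simp),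
      List.filterMap_cons_some (f := fun k => if used.getD k false = true then none else some (arr.getD k 0))
        (b := arr.getD j 0) (by simp only []; rw [hju]; simp)]
  rw [hcongr _ (by intro k hk; have := List.mem_range'_1.1 hk; omega),
      hcongr _ (by intro k hk; have := List.mem_range'_1.1 hk; omega)]
  rw [List.erase_append_right _ hnotmemA, List.erase_cons_head]

-- the values B iterates over are exactly the values at the indices A descends into
theorem vals_eq_sorted_set (arr : List Int) (used : List Bool) (hI : InvA arr used) :
    PySem.List.sorted (PySem.Set.ofList (remu arr used)) (fun v => v) false
      = ((List.range arr.length).filter (okB arr used)).map (fun j => arr.getD j 0) := by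
  set vals := ((List.range arr.length).filter (okB arr used)).map (fun j => arr.getD j 0) with hv
  have hmem_chos : ∀ j ∈ (List.range arr.length).filter (okB arr used),
      j < arr.length ∧ okB arr used j = true := by
    intro j hj
    have := List.mem_filter.1 hj
    exact ⟨List.mem_range.1 this.1, this.2⟩
  have hvals_lt : vals.Pairwise (· < ·) := by
    rw [hv, List.pairwise_map]
    refine List.Pairwise.imp_of_mem ?_ ((List.pairwise_lt_range).filter (okB arr used))
    intro a b ha hb hab
    obtain ⟨han, haok⟩ := hmem_chos a ha
    obtain ⟨hbn, hbok⟩ := hmem_chos b hb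
    have hle : arr.getD a 0 ≤ arr.getD b 0 := getD_mono arr hI.2.1 a b (by omega) hbn
    have hne : arr.getD a 0 ≠ arr.getD b 0 :=
      first_occ arr used hI b hbn hbok a hab (okB_unused arr used a haok)
    omega
  have hvals_nodup : vals.Nodup := hvals_lt.imp (fun h => ne_of_lt h)
  have hmem_iff : ∀ x, x ∈ vals ↔ x ∈ remu arr used := by
    intro x
    constructor
    · intro hx
      rw [hv] at hx
      obtain ⟨j, hjmem, hjx⟩ := List.mem_map.1 hx
      obtain ⟨hjn, hjok⟩ := hmem_chos j hjmem
      exact (mem_remu arr used x).2 ⟨j, hjn, okB_unused arr used j hjok, hjx⟩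
    · intro hx
      obtain ⟨k, hkn, hku, hkv⟩ := (mem_remu arr used x).1 hx
      have hex : ∃ m, m < arr.length ∧ used.getD m false = false ∧ arr.getD m 0 = x :=
        ⟨k, hkn, hku, hkv⟩
      classical
      obtain ⟨hjn, hju, hjx⟩ := Nat.find_spec hex
      have hjok : okB arr used (Nat.find hex) = true := by
        simp only [okB, Bool.and_eq_true, Bool.not_eq_true', Bool.or_eq_true, decide_eq_true_eq]
        refine ⟨hju, ?_⟩
        by_cases h0 : Nat.find hex = 0
        · exact Or.inl (Or.inl h0)
        · by_cases he : arr.getD (Nat.find hex) 0 = arr.getD (Nat.find hex - 1) 0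
          · refine Or.inr ?_
            by_contra hc
            have hc' : used.getD (Nat.find hex - 1) false = false := by
              cases h : used.getD (Nat.find hex - 1) false
              · rfl
              · exact absurd h hc
            exact Nat.find_min hex (show Nat.find hex - 1 < Nat.find hex by omega)
              ⟨by omega, hc', by rw [← he, hjx]⟩
          · exact Or.inl (Or.inr he)
      rw [hv]
      exact List.mem_map.2 ⟨Nat.find hex, List.mem_filter.2 ⟨List.mem_range.2 hjn, hjok⟩, hjx⟩
  apply PySem.List.sorted_eq_of_perm_of_pairwise_lt
  · exact (List.perm_ext_iff_of_nodup hvals_nodup (PySem.Set.nodup_ofList _)).2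
      (fun a => (hmem_iff a).trans (PySem.Set.mem_ofList _ a).symm)
  · exact hvals_lt

theorem flatMap_ite_filter {α β : Type} (l : List α) (p : α → Bool) (g : α → List β) :
    l.flatMap (fun x => if p x then g x else []) = (l.filter p).flatMap g := by
  induction l with
  | nil => rfl
  | cons x xs ih => by_cases h : p x <;> simp [List.filter_cons, h, ih]

-- descending preserves the invariant
theorem InvA_set (arr : List Int) (used : List Bool) (hI : InvA arr used) (j : Nat)
    (_hj : j < arr.length) (hok : okB arr used j = true) : InvA arr (used.set j true) := by
  refine ⟨by simp [hI.1], hI.2.1, ?_⟩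
  intro k hk0 hkn heq hu
  rw [getD_set' used j k true false] at hu
  rw [getD_set' used j (k - 1) true false]
  by_cases hjk1 : j = k - 1 ∧ j < used.length
  · rw [if_pos hjk1]
  · rw [if_neg hjk1]
    by_cases hjk : j = k ∧ j < used.length
    · -- k = j : the loop test guarantees used[j-1] = true
      obtain ⟨rfl, _⟩ := hjk
      simp only [okB, Bool.and_eq_true, Bool.or_eq_true, Bool.not_eq_true', decide_eq_true_eq] at hok
      have hd' : j = 0 ∨ (arr.getD j 0 ≠ arr.getD (j - 1) 0) ∨ used.getD (j - 1) false = true := by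
        tauto
      rcases hd' with h0 | hne | hu1
      · omega
      · exact absurd heq hne
      · exact hu1
    · rw [if_neg hjk] at hu
      exact hI.2.2 k hk0 hkn heq hu

theorem main_lemma : ∀ (fuel : Nat) (arr : List Int) (used : List Bool) (path : List Int),
    InvA arr used → path.length + (remu arr used).length = arr.length →
    (remu arr used).length < fuel →
    bt arr fuel used path = (permsB fuel (remu arr used)).map (fun p => path ++ p) := by
  intro fuel
  induction fuel with
  | zero => intro arr used path _ _ h; omega
  | succ fuel ih =>
    intro arr used path hI hsum hfuel
    by_cases hbase : path.length = arr.length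
    · have hremnil : remu arr used = [] := List.length_eq_zero_iff.1 (by omega)
      rw [hremnil]
      simp only [bt, permsB, if_pos hbase, List.isEmpty_nil]
      simp
    · have hremne : ¬ (remu arr used).isEmpty = true := by
        intro h
        have := List.isEmpty_iff.1 h
        rw [this] at hsum; simp at hsum; omega
      simp only [bt, permsB, if_neg hbase, if_neg hremne]
      -- LHS: normalise the loop body, fold to a flatMap over the descended indices
      rw [PySem.List.foldl_congr_mem _ _
        (fun res i => res ++ (if okB arr used i then
          bt arr fuel (used.set i true) (path ++ [arr.getD i 0]) else [])) []
        (by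
          intro res i _
          by_cases hu : used.getD i false = true
          · rw [if_pos hu]
            have hok0 : okB arr used i = false := by unfold okB; rw [hu]; rfl
            simp [hok0]
          · have hu' : used.getD i false = false := by
              cases h : used.getD i false
              · rfl
              · exact absurd h hu
            rw [if_neg hu]
            by_cases hdup : 0 < i ∧ arr.getD i 0 = arr.getD (i - 1) 0 ∧ used.getD (i - 1) false = false
            · rw [if_pos hdup]
              have hok0 : okB arr used i = false := by
                unfold okB
                rw [hu', hdup.2.2]
                simp [show i ≠ 0 by omega]
                exact hdup.2.1
              simp [hok0]
            · rw [if_neg hdup]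
              have hok1 : okB arr used i = true := by
                simp only [okB, hu', Bool.not_false, Bool.true_and, Bool.or_eq_true,
                  decide_eq_true_eq]
                push Not at hdup
                by_cases h0 : i = 0
                · exact Or.inl (Or.inl h0)
                · by_cases he : arr.getD i 0 = arr.getD (i - 1) 0
                  · have := hdup (by omega) he
                    exact Or.inr (by cases h : used.getD (i - 1) false; exact absurd h this; rfl)
                  · exact Or.inl (Or.inr he)
              simp [hok1])]
      rw [PySem.List.foldl_append_eq_flatMap, flatMap_ite_filter]
      -- RHS: the iterated values are the descended indices' values; remove? is erase
      rw [vals_eq_sorted_set arr used hI]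
      rw [PySem.List.foldl_congr_mem _ _
        (fun res v => res ++ (permsB fuel ((remu arr used).erase v)).map (fun p => v :: p)) []
        (by
          intro acc v hv
          obtain ⟨j, hjmem, hjx⟩ := List.mem_map.1 hv
          have hjn := List.mem_range.1 (List.mem_filter.1 hjmem).1
          have hjok := (List.mem_filter.1 hjmem).2
          have hvrem : v ∈ remu arr used :=
            (mem_remu arr used v).2 ⟨j, hjn, okB_unused arr used j hjok, hjx⟩
          rw [PySem.List.remove?_eq_some_erase _ v hvrem])]
      rw [PySem.List.foldl_append_eq_flatMap]
      simp only [List.nil_append, List.map_flatMap, List.flatMap_map]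
      apply List.flatMap_congr
      intro j hjmem
      have hjn := List.mem_range.1 (List.mem_filter.1 hjmem).1
      have hjok := (List.mem_filter.1 hjmem).2
      have hju : used.getD j false = false := okB_unused arr used j hjok
      have hmem : arr.getD j 0 ∈ remu arr used := (mem_remu arr used _).2 ⟨j, hjn, hju, rfl⟩
      have hrs : remu arr (used.set j true) = (remu arr used).erase (arr.getD j 0) :=
        remu_set arr used j hjn hI.1 hju (first_occ arr used hI j hjn hjok)
      have hlenerase : ((remu arr used).erase (arr.getD j 0)).length + 1 = (remu arr used).length := by
        rw [List.length_erase_of_mem hmem]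
        have : 0 < (remu arr used).length := List.length_pos_of_mem hmem
        omega
      have := ih arr (used.set j true) (path ++ [arr.getD j 0])
        (InvA_set arr used hI j hjn hjok)
        (by rw [hrs]; simp only [List.length_append, List.length_singleton]; omega)
        (by rw [hrs]; omega)
      rw [this, hrs]
      simp [Function.comp, List.map_map, List.append_assoc]
    -- (the two flatMaps now agree elementwise)

theorem remu_replicate_false (arr : List Int) :
    remu arr (List.replicate arr.length false) = arr := by
  have h1 : ∀ j : Nat, (List.replicate arr.length false).getD j false = false := by
    intro j; simp only [List.getD, List.getElem?_replicate]; split <;> rfl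
  unfold remu
  rw [List.filterMap_congr (g := fun j => some (arr.getD j 0)) (by intro a _; simp)]
  have : (fun j => some (arr.getD j 0)) = some ∘ (fun j => arr.getD j 0) := rfl
  rw [this, List.filterMap_eq_map]
  apply List.ext_getElem (by simp)
  intro i h1' h2'
  simp [List.getElem?_eq_getElem h2']

-- ===== VERDICT (by name: the statement is the Claim_ definition above) =====
theorem uniquePerms_spec : Claim_equal_uniquePerms := by
  intro arr _
  unfold Spec_uniquePerms uniquePerms uniquePerms_alt
  set sa := PySem.List.sorted arr (fun v => v) false with hsa
  have hlen : sa.length = arr.length := PySem.List.length_sorted arr _ _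
  have hrem : remu sa (List.replicate arr.length false) = sa := by
    rw [← hlen]; exact remu_replicate_false sa
  have hI : InvA sa (List.replicate arr.length false) := by
    refine ⟨by simp [hlen], ?_, ?_⟩
    · have := PySem.List.sorted_pairwise arr (fun v => v) (κ := Int)
      simpa using this
    · intro j _ hj _ hu
      have : (List.replicate arr.length false).getD j false = false := by
        simp only [List.getD, List.getElem?_replicate]
        split <;> rfl
      rw [this] at hu; exact absurd hu (by decide)
  have := main_lemma (arr.length + 1) sa (List.replicate arr.length false) [] hI
    (by rw [hrem]; simp [hlen]) (by rw [hrem]; omega)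
  rw [this, hrem]
  simp
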